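-- pv_equiv track=rewrite | github.com/Andoree/generalized_boolean_polynoms | monoms_graph_detour/find_2_hop_dead.py | count_significant_variables
-- ===== SOURCE A (Python) =====
-- def count_significant_variables(polynom_monoms_list, num_literals):
--     unique_variables_set = set()
--     for monom_mask in polynom_monoms_list:
--         for literal_id, literal_value in enumerate(monom_mask):
--             if literal_value == 1 or literal_value == -1:
--                 unique_variables_set.add(literal_id)
--                 if len(unique_variables_set) == num_literals:
--                     return len(unique_variables_set)
--     return len(unique_variables_set)
-- ===== SOURCE B (Python) =====
-- def count_significant_variables(polynom_monoms_list, num_literals):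
--     width = max((len(m) for m in polynom_monoms_list), default=0)
--     count = 0
--     for i in range(width):
--         if any(i < len(m) and (m[i] == 1 or m[i] == -1) for m in polynom_monoms_list):
--             count += 1
--             if count == num_literals:
--                 return count
--     return count
-- ===== Notes on version B (the rewrite author's own statement) =====
-- stated objective: alternative
-- what changed: Replaced the row-major scan that accumulates a set of significant positions with a column-major scan: for each candidate position the masks are probed for a ±1 entry and a plain counter is incremented, keeping the early stop at num_literals; no set is maintained.
import Mathlib
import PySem

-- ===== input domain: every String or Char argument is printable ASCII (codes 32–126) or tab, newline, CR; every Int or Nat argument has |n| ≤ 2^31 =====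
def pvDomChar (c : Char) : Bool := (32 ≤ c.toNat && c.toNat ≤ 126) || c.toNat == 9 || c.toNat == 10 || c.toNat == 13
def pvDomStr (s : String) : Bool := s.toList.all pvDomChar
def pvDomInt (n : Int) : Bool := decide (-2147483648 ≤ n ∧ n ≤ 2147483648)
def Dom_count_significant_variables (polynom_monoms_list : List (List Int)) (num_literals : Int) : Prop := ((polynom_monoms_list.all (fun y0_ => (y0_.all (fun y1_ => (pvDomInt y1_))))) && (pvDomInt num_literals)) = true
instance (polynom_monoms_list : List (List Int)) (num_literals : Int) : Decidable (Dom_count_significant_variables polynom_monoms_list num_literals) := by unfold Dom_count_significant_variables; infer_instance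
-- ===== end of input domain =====

-- B replaces A's row-major scan with a set of seen positions by a column-major scan with a plain counter (alternative decomposition, same cost).

-- ===== PORT A =====
-- inner loop `for literal_id, literal_value in enumerate(monom_mask)`; `enumerate` is
-- ported exactly as an index-carrying recursion; `Sum.inr` is the early `return`.
def csvInner (num_literals : Int) (lid : Int) (mask : List Int) (s : PySem.Set Int) : PySem.Set Int ⊕ Int :=
  match mask with
  | [] => Sum.inl s
  | lv :: rest =>
    if lv = 1 ∨ lv = -1 then
      if ((PySem.Set.add s lid).length : Int) = num_literals then
        Sum.inr ((PySem.Set.add s lid).length : Int)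
      else csvInner num_literals (lid + 1) rest (PySem.Set.add s lid)
    else csvInner num_literals (lid + 1) rest s

-- outer loop `for monom_mask in polynom_monoms_list`
def csvOuter (num_literals : Int) (rows : List (List Int)) (s : PySem.Set Int) : Int :=
  match rows with
  | [] => (s.length : Int)
  | m :: rest =>
    match csvInner num_literals 0 m s with
    | Sum.inr r => r
    | Sum.inl s' => csvOuter num_literals rest s'

def count_significant_variables (polynom_monoms_list : List (List Int)) (num_literals : Int) : Int :=
  csvOuter num_literals polynom_monoms_list PySem.Set.empty

-- ===== PORT B =====
-- `any(i < len(m) and (m[i] == 1 or m[i] == -1) for m in polynom_monoms_list)`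
def bAnyCol (l : List (List Int)) (i : Nat) : Bool :=
  l.any (fun m => decide (i < m.length) && (m.getD i 0 == 1 || m.getD i 0 == -1))

-- `for i in range(width)` with the running counter and the early return
def bLoop (l : List (List Int)) (nl : Int) (width i : Nat) (count : Int) : Int :=
  if h : i < width then
    if bAnyCol l i then
      if count + 1 = nl then count + 1
      else bLoop l nl width (i + 1) (count + 1)
    else bLoop l nl width (i + 1) count
  else count
termination_by width - i
decreasing_by all_goals omega

def count_significant_variables_alt (polynom_monoms_list : List (List Int)) (num_literals : Int) : Int :=
  bLoop polynom_monoms_list num_literals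
    (polynom_monoms_list.foldl (fun w m => max w m.length) 0) 0 0

-- ===== PRECONDITION & SPEC =====
def Spec_count_significant_variables (polynom_monoms_list : List (List Int)) (num_literals : Int) (out : Int) : Prop := out = count_significant_variables_alt polynom_monoms_list num_literals
instance (polynom_monoms_list : List (List Int)) (num_literals : Int) (out : Int) : Decidable (Spec_count_significant_variables polynom_monoms_list num_literals out) := by unfold Spec_count_significant_variables; infer_instance

-- ===== CLAIM (what is proved, stated in full; the proofs are below) =====
def Claim_equal_count_significant_variables : Prop := ∀ (polynom_monoms_list : List (List Int)) (num_literals : Int), Dom_count_significant_variables polynom_monoms_list num_literals → Spec_count_significant_variables polynom_monoms_list num_literals (count_significant_variables polynom_monoms_list num_literals)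

-- ===== LEMMAS AND PROOFS =====

-- the set A would have built with no early return, row tail `mask` starting at index `lid`
def sigAdd (lid : Int) (mask : List Int) (s : PySem.Set Int) : PySem.Set Int :=
  match mask with
  | [] => s
  | lv :: rest => sigAdd (lid + 1) rest (if lv = 1 ∨ lv = -1 then PySem.Set.add s lid else s)

def sigAll (rows : List (List Int)) (s : PySem.Set Int) : PySem.Set Int :=
  rows.foldl (fun t m => sigAdd 0 m t) s

lemma len_add_cases (s : PySem.Set Int) (x : Int) :
    (PySem.Set.add s x).length = if x ∈ s then s.length else s.length + 1 := by
  rw [PySem.Set.add_eq_ite]; split <;> simp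

lemma len_add_pos (s : PySem.Set Int) (x : Int) : 1 ≤ (PySem.Set.add s x).length := by
  rw [len_add_cases]; split
  · exact List.length_pos_of_mem (by assumption)
  · omega

lemma len_le_sigAdd (mask : List Int) : ∀ (lid : Int) (s : PySem.Set Int),
    s.length ≤ (sigAdd lid mask s).length := by
  induction mask with
  | nil => intro lid s; simp [sigAdd]
  | cons v rest ih =>
    intro lid s
    rw [sigAdd]
    refine le_trans ?_ (ih (lid + 1) _)
    split
    · rw [len_add_cases]; split <;> omega
    · exact le_refl _

lemma len_le_sigAll (rows : List (List Int)) : ∀ s : PySem.Set Int,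
    s.length ≤ (sigAll rows s).length := by
  induction rows with
  | nil => intro s; simp [sigAll]
  | cons m rest ih =>
    intro s
    exact le_trans (len_le_sigAdd m 0 s) (ih (sigAdd 0 m s))

lemma mem_sigAdd (mask : List Int) : ∀ (lid : Int) (s : PySem.Set Int) (x : Int),
    x ∈ sigAdd lid mask s ↔
      x ∈ s ∨ ∃ j : Nat, ∃ _ : j < mask.length, (mask[j] = 1 ∨ mask[j] = -1) ∧ x = lid + j := by
  induction mask with
  | nil => intro lid s x; simp [sigAdd]
  | cons v rest ih =>
    intro lid s x
    rw [sigAdd, ih]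
    constructor
    · rintro (hx | ⟨j, hj, hpm, rfl⟩)
      · by_cases hv : v = 1 ∨ v = -1
        · rw [if_pos hv] at hx
          rcases (PySem.Set.mem_add _ _ _).mp hx with h | rfl
          · exact Or.inl h
          · exact Or.inr ⟨0, by simp, by simpa using hv, by simp⟩
        · rw [if_neg hv] at hx; exact Or.inl hx
      · exact Or.inr ⟨j + 1, by simpa using hj, by simpa using hpm, by push_cast; ring⟩
    · rintro (hx | ⟨j, hj, hpm, rfl⟩)
      · left
        by_cases hv : v = 1 ∨ v = -1
        · rw [if_pos hv]; exact (PySem.Set.mem_add _ _ _).mpr (Or.inl hx)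
        · rw [if_neg hv]; exact hx
      · cases j with
        | zero =>
          left
          have hv : v = 1 ∨ v = -1 := by simpa using hpm
          rw [if_pos hv]
          exact (PySem.Set.mem_add _ _ _).mpr (Or.inr (by simp))
        | succ j =>
          exact Or.inr ⟨j, by simpa using hj, by simpa using hpm, by push_cast; ring⟩

lemma mem_sigAll (rows : List (List Int)) : ∀ (s : PySem.Set Int) (x : Int),
    x ∈ sigAll rows s ↔
      x ∈ s ∨ ∃ m ∈ rows, ∃ j : Nat, ∃ _ : j < m.length, (m[j] = 1 ∨ m[j] = -1) ∧ x = (j : Int) := by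
  induction rows with
  | nil => intro s x; simp [sigAll]
  | cons m rest ih =>
    intro s x
    have h1 : sigAll (m :: rest) s = sigAll rest (sigAdd 0 m s) := by simp [sigAll]
    rw [h1, ih, mem_sigAdd]
    constructor
    · rintro ((hx | ⟨j, hj, hpm, rfl⟩) | ⟨m', hm', j, hj, hpm, rfl⟩)
      · exact Or.inl hx
      · exact Or.inr ⟨m, by simp, j, hj, hpm, by simp⟩
      · exact Or.inr ⟨m', by simp [hm'], j, hj, hpm, rfl⟩
    · rintro (hx | ⟨m', hm', j, hj, hpm, rfl⟩)
      · exact Or.inl (Or.inl hx)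
      · rcases List.mem_cons.mp hm' with rfl | hm'
        · exact Or.inl (Or.inr ⟨j, hj, hpm, by simp⟩)
        · exact Or.inr ⟨m', hm', j, hj, hpm, rfl⟩

lemma nodup_sigAdd (mask : List Int) : ∀ (lid : Int) (s : PySem.Set Int),
    s.Nodup → (sigAdd lid mask s).Nodup := by
  induction mask with
  | nil => intro lid s hs; simpa [sigAdd] using hs
  | cons v rest ih =>
    intro lid s hs
    rw [sigAdd]
    apply ih
    split
    · exact PySem.Set.nodup_add _ _ hs
    · exact hs

lemma nodup_sigAll (rows : List (List Int)) : ∀ s : PySem.Set Int,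
    s.Nodup → (sigAll rows s).Nodup := by
  induction rows with
  | nil => intro s hs; simpa [sigAll] using hs
  | cons m rest ih =>
    intro s hs
    have h1 : sigAll (m :: rest) s = sigAll rest (sigAdd 0 m s) := by simp [sigAll]
    rw [h1]
    exact ih _ (nodup_sigAdd m 0 s hs)

lemma csvInner_spec (nl : Int) (mask : List Int) : ∀ (lid : Int) (s : PySem.Set Int),
    ((s.length : Int) < nl ∨ nl ≤ 0) →
    csvInner nl lid mask s =
      (if 0 < nl ∧ nl ≤ ((sigAdd lid mask s).length : Int) then Sum.inr nl
       else Sum.inl (sigAdd lid mask s)) := by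
  induction mask with
  | nil =>
    intro lid s hs
    rw [csvInner, sigAdd, if_neg (by omega)]
  | cons v rest ih =>
    intro lid s hs
    rw [csvInner, sigAdd]
    by_cases hv : v = 1 ∨ v = -1
    · rw [if_pos hv, if_pos hv]
      by_cases he : ((PySem.Set.add s lid).length : Int) = nl
      · rw [if_pos he]
        have h1 : 1 ≤ (PySem.Set.add s lid).length := len_add_pos s lid
        have h2 : (PySem.Set.add s lid).length ≤ (sigAdd (lid + 1) rest (PySem.Set.add s lid)).length :=
          len_le_sigAdd rest (lid + 1) _
        rw [if_pos ⟨by omega, by omega⟩, he]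
      · rw [if_neg he]
        apply ih
        have hle : (PySem.Set.add s lid).length ≤ s.length + 1 := by
          rw [len_add_cases]; split <;> omega
        rcases hs with h | h
        · left; omega
        · right; exact h
    · rw [if_neg hv, if_neg hv]
      exact ih (lid + 1) s hs

lemma csvOuter_spec (nl : Int) (rows : List (List Int)) : ∀ s : PySem.Set Int,
    ((s.length : Int) < nl ∨ nl ≤ 0) →
    csvOuter nl rows s =
      if 0 < nl ∧ nl ≤ ((sigAll rows s).length : Int) then nl
      else ((sigAll rows s).length : Int) := by
  induction rows with
  | nil =>
    intro s hs
    have h0 : sigAll [] s = s := by simp [sigAll]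
    rw [csvOuter, h0, if_neg (by omega)]
  | cons m rest ih =>
    intro s hs
    have hAll : sigAll (m :: rest) s = sigAll rest (sigAdd 0 m s) := by simp [sigAll]
    have hin := csvInner_spec nl m 0 s hs
    by_cases hc : 0 < nl ∧ nl ≤ ((sigAdd 0 m s).length : Int)
    · rw [if_pos hc] at hin
      have hred : csvOuter nl (m :: rest) s = nl := by rw [csvOuter, hin]
      have hmono : (sigAdd 0 m s).length ≤ (sigAll (m :: rest) s).length := by
        rw [hAll]; exact len_le_sigAll rest _
      rw [hred, if_pos ⟨hc.1, by omega⟩]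
    · rw [if_neg hc] at hin
      have hred : csvOuter nl (m :: rest) s = csvOuter nl rest (sigAdd 0 m s) := by
        rw [csvOuter, hin]
      have hH : (((sigAdd 0 m s).length : Int) < nl ∨ nl ≤ 0) := by
        by_cases h0 : 0 < nl
        · left; by_contra hge; exact hc ⟨h0, by omega⟩
        · right; omega
      rw [hred, ih _ hH, hAll]

lemma A_closed (l : List (List Int)) (nl : Int) :
    count_significant_variables l nl =
      if 0 < nl ∧ nl ≤ ((sigAll l PySem.Set.empty).length : Int) then nl
      else ((sigAll l PySem.Set.empty).length : Int) := by
  have hlen : (PySem.Set.empty : PySem.Set Int).length = 0 := rfl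
  exact csvOuter_spec nl l PySem.Set.empty (by rw [hlen]; omega)

lemma bLoop_spec (l : List (List Int)) (nl : Int) (width : Nat) :
    ∀ (k i : Nat) (count : Int), width - i = k →
    bLoop l nl width i count =
      if count < nl ∧ nl ≤ count + ((List.range' i k).countP (fun j => bAnyCol l j) : Int) then nl
      else count + ((List.range' i k).countP (fun j => bAnyCol l j) : Int) := by
  intro k
  induction k with
  | zero =>
    intro i count hk
    rw [bLoop, dif_neg (by omega)]
    have h0 : (List.range' i 0) = [] := rfl
    rw [h0]
    simp only [List.countP_nil, Nat.cast_zero, add_zero]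
    rw [if_neg (by omega)]
  | succ k ihk =>
    intro i count hk
    have hi : i < width := by omega
    rw [bLoop, dif_pos hi]
    have hr : List.range' i (k + 1) = i :: List.range' (i + 1) k := rfl
    rw [hr, List.countP_cons]
    by_cases hb : bAnyCol l i
    · rw [if_pos hb]
      simp only [hb, if_pos]
      by_cases he : count + 1 = nl
      · rw [if_pos he, if_pos ⟨by omega, by push_cast; omega⟩]
        exact he
      · rw [if_neg he, ihk (i + 1) (count + 1) (by omega)]
        split_ifs <;> push_cast <;> omega
    · rw [if_neg hb]
      simp only [hb, if_neg, Bool.false_eq_true, not_false_eq_true, add_zero]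
      exact ihk (i + 1) count (by omega)

lemma B_closed (l : List (List Int)) (nl : Int) :
    count_significant_variables_alt l nl =
      if 0 < nl ∧ nl ≤ (((List.range (l.foldl (fun w m => max w m.length) 0)).countP
          (fun j => bAnyCol l j)) : Int) then nl
      else (((List.range (l.foldl (fun w m => max w m.length) 0)).countP (fun j => bAnyCol l j)) : Int) := by
  show bLoop l nl (l.foldl (fun w m => max w m.length) 0) 0 0 = _
  rw [bLoop_spec l nl _ (l.foldl (fun w m => max w m.length) 0) 0 0 (by omega),
    ← List.range_eq_range']
  simp only [zero_add]

lemma bAny_iff (l : List (List Int)) (j : Nat) :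
    bAnyCol l j = true ↔ ∃ m ∈ l, ∃ _ : j < m.length, (m[j] = 1 ∨ m[j] = -1) := by
  simp only [bAnyCol, List.any_eq_true, Bool.and_eq_true, decide_eq_true_eq,
    Bool.or_eq_true, beq_iff_eq]
  constructor
  · rintro ⟨m, hm, hj, hv⟩
    exact ⟨m, hm, hj, by rwa [List.getD_eq_getElem _ _ hj] at hv⟩
  · rintro ⟨m, hm, hj, hv⟩
    exact ⟨m, hm, hj, by rwa [List.getD_eq_getElem _ _ hj]⟩

lemma foldl_max_le_init (l : List (List Int)) : ∀ a : Nat,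
    a ≤ l.foldl (fun w m => max w m.length) a := by
  induction l with
  | nil => intro a; simp
  | cons m rest ih =>
    intro a
    rw [List.foldl_cons]
    exact le_trans (le_max_left _ _) (ih _)

lemma mem_le_foldl_max (l : List (List Int)) : ∀ (a : Nat) (m : List Int), m ∈ l →
    m.length ≤ l.foldl (fun w m => max w m.length) a := by
  induction l with
  | nil => intro a m h; cases h
  | cons m0 rest ih =>
    intro a m hm
    rw [List.foldl_cons]
    rcases List.mem_cons.mp hm with rfl | h
    · exact le_trans (le_max_right _ _) (foldl_max_le_init rest _)
    · exact ih _ _ h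

lemma card_bridge (l : List (List Int)) :
    (sigAll l PySem.Set.empty).length =
      (List.range (l.foldl (fun w m => max w m.length) 0)).countP (fun j => bAnyCol l j) := by
  have h1 : (sigAll l PySem.Set.empty).Nodup := nodup_sigAll l _ List.nodup_nil
  have h2 : (((List.range (l.foldl (fun w m => max w m.length) 0)).filter
      (fun j => bAnyCol l j)).map (fun j : Nat => (j : Int))).Nodup :=
    (List.Nodup.filter _ (List.nodup_range)).map (fun a b h => by exact_mod_cast h)
  have hperm : (sigAll l PySem.Set.empty).Perm
      (((List.range (l.foldl (fun w m => max w m.length) 0)).filter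
        (fun j => bAnyCol l j)).map (fun j : Nat => (j : Int))) := by
    rw [List.perm_ext_iff_of_nodup h1 h2]
    intro x
    rw [mem_sigAll]
    simp only [List.mem_map, List.mem_filter, List.mem_range]
    constructor
    · rintro (hx | ⟨m, hm, j, hj, hpm, rfl⟩)
      · cases hx
      · exact ⟨j, ⟨lt_of_lt_of_le hj (mem_le_foldl_max l 0 m hm),
          (bAny_iff l j).mpr ⟨m, hm, hj, hpm⟩⟩, rfl⟩
    · rintro ⟨j, ⟨hjW, hb⟩, rfl⟩
      rcases (bAny_iff l j).mp hb with ⟨m, hm, hj, hpm⟩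
      exact Or.inr ⟨m, hm, j, hj, hpm, rfl⟩
  rw [hperm.length_eq, List.length_map, List.countP_eq_length_filter]

-- ===== VERDICT (by name: the statement is the Claim_ definition above) =====
theorem count_significant_variables_spec : Claim_equal_count_significant_variables := by
  intro l nl _
  unfold Spec_count_significant_variables
  rw [A_closed, B_closed, card_bridge]
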